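-- pv_equiv track=rewrite | github.com/nelsonlai/freelance | leetcode/leetcode_problems/codes/1863_sum-of-all-subset-xor-totals/python3.py | subsetXORSum
-- ===== SOURCE A (Python) =====
-- from typing import List
--
-- def subsetXORSum(nums: List[int]) -> int:
--     result = 0
--     n = len(nums)
--
--     # For each bit position
--     for bit in range(32):
--         count = 0
--         for num in nums:
--             if num & (1 << bit):
--                 count += 1
--
--         # If count > 0, this bit contributes to 2^(n-1) subsets
--         if count > 0:
--             result += (1 << bit) * (1 << (n - 1))
--
--     return result
-- ===== SOURCE B (Python) =====
-- from typing import List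
--
-- def subsetXORSum(nums: List[int]) -> int:
--     # Fold the OR of the low-32-bit views in one pass; each present bit
--     # contributes to exactly 2^(n-1) subsets.
--     if not nums:
--         return 0
--     or_all = 0
--     for num in nums:
--         or_all |= num & 0xFFFFFFFF
--     return or_all << (len(nums) - 1)
-- ===== Notes on version B (the rewrite author's own statement) =====
-- stated objective: faster
-- what changed: Replaces the 32-bit outer loop that counts, per bit, how many elements have that bit with a single pass folding the bitwise OR of the low-32-bit views of all elements, then shifts the OR left by n-1.
import Mathlib
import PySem

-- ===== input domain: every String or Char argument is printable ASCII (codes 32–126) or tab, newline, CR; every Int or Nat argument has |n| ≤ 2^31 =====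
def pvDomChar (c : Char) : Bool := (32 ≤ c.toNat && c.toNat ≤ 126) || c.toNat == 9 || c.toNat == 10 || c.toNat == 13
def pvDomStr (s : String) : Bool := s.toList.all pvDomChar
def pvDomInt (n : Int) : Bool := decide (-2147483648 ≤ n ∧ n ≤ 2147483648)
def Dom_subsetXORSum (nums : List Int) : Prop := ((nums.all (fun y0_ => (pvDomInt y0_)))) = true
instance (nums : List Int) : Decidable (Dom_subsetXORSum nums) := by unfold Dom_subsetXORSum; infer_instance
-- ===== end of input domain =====

-- B replaces A's 32 per-bit counting passes by one pass folding the OR of the 32-bit views, shifted left by n-1 (measured faster in a timing run).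

-- ===== PORT A =====
-- Python's `a << k` for the nonnegative shift amounts occurring here (PYSEM.md: core `<<<` with a Nat amount);
-- the amounts `bit` (0..31) and `n-1` (evaluated only when count>0, hence n ≥ 1) are nonnegative, so `.toNat` is exact.
def pyShl (a : Int) (k : Nat) : Int := a <<< k

def subsetXORSum (nums : List Int) : Int :=
  let n : Int := nums.length
  (PySem.List.pyRange 0 32 1).foldl (fun result bit =>
    let count : Int := nums.foldl (fun count num =>
      if PySem.Int.band num (pyShl 1 bit.toNat) ≠ 0 then count + 1 else count) 0
    if count > 0 then result + pyShl 1 bit.toNat * pyShl 1 (n - 1).toNat else result) 0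

-- ===== PORT B =====
def subsetXORSum_alt (nums : List Int) : Int :=
  if nums = [] then 0
  else
    let orAll := nums.foldl (fun acc num => PySem.Int.bor acc (PySem.Int.band num 0xFFFFFFFF)) 0
    orAll <<< (nums.length - 1)

-- ===== PRECONDITION & SPEC =====
def Spec_subsetXORSum (nums : List Int) (out : Int) : Prop := out = subsetXORSum_alt nums
instance (nums : List Int) (out : Int) : Decidable (Spec_subsetXORSum nums out) := by unfold Spec_subsetXORSum; infer_instance

-- ===== CLAIM (what is proved, stated in full; the proofs are below) =====
def Claim_equal_subsetXORSum : Prop := ∀ (nums : List Int), Dom_subsetXORSum nums → Spec_subsetXORSum nums (subsetXORSum nums)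

-- ===== LEMMAS AND PROOFS =====

-- `m & 0xFFFFFFFF` on Nat is `m % 2^32`
theorem natAndMask (m : Nat) : m &&& 4294967295 = m % 4294967296 := by
  apply Nat.eq_of_testBit_eq
  intro i
  have h1 : (4294967295 : Nat) = 2 ^ 32 - 1 := by norm_num
  have h2 : (4294967296 : Nat) = 2 ^ 32 := by norm_num
  rw [h1, h2, Nat.testBit_and, Nat.testBit_two_pow_sub_one, Nat.testBit_mod_two_pow, Bool.and_comm]

-- Python `num & 0xFFFFFFFF` equals `num mod 2^32`
theorem mask_emod (num : Int) : PySem.Int.band num 4294967295 = num % 4294967296 := by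
  unfold PySem.Int.band
  split_ifs with h1 h2 h3
  · have ht : (4294967295 : Int).toNat = 4294967295 := by decide
    rw [ht, natAndMask]
    omega
  · omega
  · have ht : (4294967295 : Int).toNat = 4294967295 := by decide
    rw [ht, Nat.and_comm, natAndMask]
    omega
  · omega

-- bits of the all-ones complement
theorem compl_testBit : ∀ (j b r : Nat), b < j → r < 2 ^ j → (2 ^ j - 1 - r).testBit b = !(r.testBit b) := by
  intro j
  induction j with
  | zero => intro b r hb; omega
  | succ j ih =>
    intro b r hb hr
    have h2 : 2 ^ (j + 1) = 2 * 2 ^ j := by ring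
    cases b with
    | zero =>
      have hm : (2 ^ (j + 1) - 1 - r) % 2 = 1 - r % 2 := by omega
      rw [Nat.testBit_zero, Nat.testBit_zero, hm]
      rcases Nat.mod_two_eq_zero_or_one r with h | h <;> simp [h]
    | succ b =>
      have hd : (2 ^ (j + 1) - 1 - r) / 2 = 2 ^ j - 1 - r / 2 := by omega
      rw [Nat.testBit_succ, Nat.testBit_succ, hd]
      exact ih b (r / 2) (by omega) (by omega)

-- bit b of `num & 0xFFFFFFFF` (as a Nat) versus A's test `num & (1 << b) != 0`, for b < 32
theorem maskBit (num : Int) (b : Nat) (hb : b < 32) :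
    ((num % 4294967296).toNat.testBit b = true) ↔ PySem.Int.band num (pyShl 1 b) ≠ 0 := by
  have hpow : pyShl 1 b = ((2 ^ b : Nat) : Int) := by
    rw [pyShl, Int.shiftLeft_eq, one_mul]; push_cast; ring
  have hplt : (2:Nat) ^ b > 0 := Nat.pow_pos (by norm_num)
  rw [hpow]
  unfold PySem.Int.band
  split_ifs with h1 h2 h3
  · -- 0 ≤ num
    have ht : ((2 ^ b : Nat) : Int).toNat = 2 ^ b := by omega
    rw [ht, Nat.and_two_pow]
    have hm : (num % 4294967296).toNat = num.toNat % 4294967296 := by omega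
    have h32 : (4294967296 : Nat) = 2 ^ 32 := by norm_num
    rw [hm, h32, Nat.testBit_mod_two_pow]
    cases hbt : num.toNat.testBit b <;> simp [hb]
  · exfalso; exact h2 (by positivity)
  · -- num < 0
    have ht : ((2 ^ b : Nat) : Int).toNat = 2 ^ b := by omega
    rw [ht, Nat.two_pow_and]
    set k : Nat := (-num - 1).toNat with hk
    have hm : (num % 4294967296).toNat = 4294967296 - 1 - k % 4294967296 := by omega
    have h32 : (4294967296 : Nat) = 2 ^ 32 := by norm_num
    rw [hm, h32]
    rw [show (2:Nat) ^ 32 - 1 - k % 2 ^ 32 = 2 ^ 32 - 1 - k % 2 ^ 32 from rfl]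
    rw [compl_testBit 32 b (k % 2 ^ 32) hb (Nat.mod_lt _ (by norm_num)),
        Nat.testBit_mod_two_pow]
    cases hbt : k.testBit b <;> simp [hb]
  · exfalso; exact h3 (by positivity)

-- binary decomposition: folding the set bits of n over range k gives n % 2^k
theorem decomp (g : Nat → Bool) (n : Nat) (hg : ∀ b, g b = n.testBit b) :
    ∀ k, (List.range k).foldl (fun s b => s + (if g b then 2 ^ b else 0)) 0 = n % 2 ^ k := by
  intro k
  induction k with
  | zero => simp [Nat.mod_one]
  | succ k ih =>
    rw [List.range_succ, List.foldl_append, ih]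
    simp only [List.foldl_cons, List.foldl_nil]
    have hbit : n.testBit k = decide (n / 2 ^ k % 2 = 1) := by
      have := Nat.testBit_div_two_pow n 0 (n := k)
      simpa [Nat.testBit_zero] using this.symm
    have hms := Nat.mod_pow_succ (x := n) (b := 2) (k := k)
    rcases Nat.mod_two_eq_zero_or_one (n / 2 ^ k) with h | h <;>
      simp [hg, hbit, h, hms]

-- bits of a fold of ORs
theorem orFold_testBit (ms : List Nat) : ∀ (a : Nat) (b : Nat),
    (ms.foldl (· ||| ·) a).testBit b = (a.testBit b || ms.any (fun m => m.testBit b)) := by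
  induction ms with
  | nil => simp
  | cons m ms ih =>
    intro a b
    simp [List.foldl_cons, ih, Bool.or_assoc]

-- an OR of values below 2^32 stays below 2^32
theorem lor_lt (a m : Nat) (ha : a < 4294967296) (hm : m < 4294967296) : a ||| m < 4294967296 := by
  have h32 : (4294967296 : Nat) = 2 ^ 32 := by norm_num
  have key : (a ||| m) % 2 ^ 32 = a ||| m := by
    apply Nat.eq_of_testBit_eq
    intro i
    rw [Nat.testBit_mod_two_pow, Nat.testBit_lor]
    by_cases hi : i < 32
    · simp [hi]
    · have hle : 2 ^ 32 ≤ 2 ^ i := Nat.pow_le_pow_right (by norm_num) (by omega)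
      have hA : a.testBit i = false := Nat.testBit_lt_two_pow (by omega)
      have hM : m.testBit i = false := Nat.testBit_lt_two_pow (by omega)
      simp [hi, hA, hM]
  have hlt : (a ||| m) % 2 ^ 32 < 2 ^ 32 := Nat.mod_lt _ (by norm_num)
  omega

theorem orFold_lt (ms : List Nat) : ∀ (a : Nat), a < 4294967296 → (∀ m ∈ ms, m < 4294967296) →
    ms.foldl (· ||| ·) a < 4294967296 := by
  induction ms with
  | nil => intro a ha _; simpa using ha
  | cons m ms ih =>
    intro a ha hmem
    simp only [List.foldl_cons]
    exact ih _ (lor_lt a m ha (hmem m (by simp))) (fun x hx => hmem x (by simp [hx]))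

-- B's Int fold equals a Nat fold of ORs over the masked values
theorem bfold (nums : List Int) : ∀ (a : Nat),
    nums.foldl (fun acc num => PySem.Int.bor acc (PySem.Int.band num 0xFFFFFFFF)) (a : Int)
      = ((nums.map (fun num => (num % 4294967296).toNat)).foldl (· ||| ·) a : Nat) := by
  induction nums with
  | nil => intro a; simp
  | cons num nums ih =>
    intro a
    simp only [List.foldl_cons, List.map_cons]
    have hb : PySem.Int.band num 0xFFFFFFFF = ((num % 4294967296).toNat : Int) := by
      rw [mask_emod]; omega
    rw [hb, PySem.Int.bor_natCast, ih]

-- A's inner count is positive iff some element satisfies the test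
theorem count_pos (p : Int → Prop) [DecidablePred p] (xs : List Int) : ∀ (c : Int), 0 ≤ c →
    (0 < xs.foldl (fun count num => if p num then count + 1 else count) c ↔
      (0 < c ∨ ∃ x ∈ xs, p x)) := by
  induction xs with
  | nil => intro c hc; simp
  | cons x xs ih =>
    intro c hc
    by_cases hp : p x
    · rw [List.foldl_cons, if_pos hp, ih (c + 1) (by omega)]
      constructor
      · intro _; right; exact ⟨x, by simp, hp⟩
      · intro _; left; omega
    · rw [List.foldl_cons, if_neg hp, ih c hc]
      simp only [List.mem_cons]
      constructor
      · rintro (h | ⟨y, hy, hpy⟩)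
        · exact Or.inl h
        · exact Or.inr ⟨y, Or.inr hy, hpy⟩
      · rintro (h | ⟨y, rfl | hy, hpy⟩)
        · exact Or.inl h
        · exact absurd hpy hp
        · exact Or.inr ⟨y, hy, hpy⟩

-- Nat fold of bit weights: shifting the accumulator out
theorem natFoldShift (g : Nat → Bool) (l : List Nat) : ∀ (a : Nat),
    l.foldl (fun s b => s + (if g b then 2 ^ b else 0)) a
      = a + l.foldl (fun s b => s + (if g b then 2 ^ b else 0)) 0 := by
  induction l with
  | nil => simp
  | cons x l ih =>
    intro a
    simp only [List.foldl_cons, Nat.zero_add]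
    rw [ih (a + _), ih (if g x then 2 ^ x else 0)]
    omega

-- factoring the common multiplier P out of A's outer fold
theorem foldFactor (g : Nat → Bool) (P : Int) (l : List Nat) : ∀ (acc : Int),
    l.foldl (fun r b => if g b then r + (2 ^ b : Int) * P else r) acc
      = acc + (l.foldl (fun s b => s + (if g b then 2 ^ b else 0)) 0 : Nat) * P := by
  induction l with
  | nil => intro acc; simp
  | cons x l ih =>
    intro acc
    simp only [List.foldl_cons, Nat.zero_add]
    rw [ih, natFoldShift g l (if g x then 2 ^ x else 0)]
    by_cases hx : g x <;> simp [hx] <;> ring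

theorem pyRange32 : PySem.List.pyRange 0 32 1 = List.map (fun (i : Nat) => (i : Int)) (List.range 32) := by decide

-- characterisation of A as a weighted sum of the occupied bit positions
theorem A_char (nums : List Int) :
    subsetXORSum nums =
      (((List.range 32).foldl (fun s b =>
          s + (if nums.any (fun num => decide (PySem.Int.band num (pyShl 1 b) ≠ 0)) then 2 ^ b else 0)) 0 : Nat) : Int)
        * pyShl 1 ((nums.length : Int) - 1).toNat := by
  simp only [subsetXORSum, pyRange32, List.foldl_map, Int.toNat_natCast, gt_iff_lt]
  have hcongr : ∀ (acc : Int), ∀ b ∈ List.range 32,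
      (if 0 < nums.foldl (fun (count : Int) num =>
            if PySem.Int.band num (pyShl 1 b) ≠ 0 then count + 1 else count) 0 then
        acc + pyShl 1 b * pyShl 1 ((nums.length : Int) - 1).toNat else acc)
      = (if nums.any (fun num => decide (PySem.Int.band num (pyShl 1 b) ≠ 0)) then
          acc + (2 ^ b : Int) * pyShl 1 ((nums.length : Int) - 1).toNat else acc) := by
    intro acc b _
    have hpow : pyShl 1 b = (2 ^ b : Int) := by rw [pyShl, Int.shiftLeft_eq, one_mul]
    by_cases h : ∃ x ∈ nums, PySem.Int.band x (pyShl 1 b) ≠ 0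
    · have hany : (nums.any fun num => decide (PySem.Int.band num (pyShl 1 b) ≠ 0)) = true := by
        simpa [List.any_eq_true] using h
      rw [if_pos ((count_pos (fun num => PySem.Int.band num (pyShl 1 b) ≠ 0) nums 0
            (by omega)).mpr (Or.inr h)), if_pos hany, hpow]
    · have hany : ¬ ((nums.any fun num => decide (PySem.Int.band num (pyShl 1 b) ≠ 0)) = true) := by
        simpa [List.any_eq_true] using h
      have hcnt : ¬ 0 < nums.foldl (fun (count : Int) num =>
          if PySem.Int.band num (pyShl 1 b) ≠ 0 then count + 1 else count) 0 := by
        intro hc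
        rcases (count_pos (fun num => PySem.Int.band num (pyShl 1 b) ≠ 0) nums 0
            (by omega)).mp hc with h0 | hex
        · omega
        · exact h hex
      rw [if_neg hcnt, if_neg hany]
  refine Eq.trans (PySem.List.foldl_congr_mem _ _ _ _ hcongr) ?_
  exact (foldFactor (fun b => nums.any fun num => decide (PySem.Int.band num (pyShl 1 b) ≠ 0))
      (pyShl 1 ((nums.length : Int) - 1).toNat) (List.range 32) 0).trans (by simp)

-- B's fold starting from the literal 0
theorem bfold0 (nums : List Int) :
    nums.foldl (fun acc num => PySem.Int.bor acc (PySem.Int.band num 0xFFFFFFFF)) (0 : Int)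
      = ((nums.map (fun num => (num % 4294967296).toNat)).foldl (· ||| ·) 0 : Nat) := by
  simpa using bfold nums 0

-- ===== VERDICT (by name: the statement is the Claim_ definition above) =====
theorem subsetXORSum_spec : Claim_equal_subsetXORSum := by
  intro nums _
  unfold Spec_subsetXORSum subsetXORSum_alt
  by_cases hnil : nums = []
  · subst hnil; decide
  · rw [if_neg hnil]
    have hlen : 0 < nums.length := List.length_pos_iff.mpr hnil
    set ms : List Nat := nums.map (fun num => (num % 4294967296).toNat) with hms
    set N : Nat := ms.foldl (· ||| ·) 0 with hN
    have hNlt : N < 4294967296 := by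
      rw [hN]
      apply orFold_lt
      · norm_num
      · intro m hm
        rw [hms] at hm
        rcases List.mem_map.mp hm with ⟨num, _, rfl⟩
        omega
    have hsum : (List.range 32).foldl (fun s b =>
        s + (if nums.any (fun num => decide (PySem.Int.band num (pyShl 1 b) ≠ 0)) then 2 ^ b else 0)) 0 = N := by
      have hc : ∀ (acc : Nat), ∀ b ∈ List.range 32,
          acc + (if nums.any (fun num => decide (PySem.Int.band num (pyShl 1 b) ≠ 0)) then 2 ^ b else 0)
            = acc + (if N.testBit b then 2 ^ b else 0) := by
        intro acc b hb
        have hb32 : b < 32 := List.mem_range.mp hb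
        have hbit : nums.any (fun num => decide (PySem.Int.band num (pyShl 1 b) ≠ 0)) = N.testBit b := by
          rw [hN, orFold_testBit, Nat.zero_testBit, Bool.false_or, hms, List.any_map]
          refine List.any_congr rfl (fun num => ?_)
          simp only [Function.comp_apply]
          rcases maskBit num b hb32 with hmb
          cases h : (num % 4294967296).toNat.testBit b
          · simp only [h] at hmb
            simp [show ¬ PySem.Int.band num (pyShl 1 b) ≠ 0 by tauto]
          · simp [hmb.mp h]
        rw [hbit]
      refine Eq.trans (PySem.List.foldl_congr_mem _ _ _ _ hc) ?_
      have hd := decomp N.testBit N (fun _ => rfl) 32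
      rw [hd]
      have h32 : (2:Nat) ^ 32 = 4294967296 := by norm_num
      omega
    rw [A_char, hsum, bfold0]
    have hsh : ((nums.length : Int) - 1).toNat = nums.length - 1 := by omega
    rw [hsh]
    simp only [pyShl, Int.shiftLeft_eq, one_mul]
    ring
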